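-- pv_equiv track=rewrite | github.com/RizwanMolla/GfG-POTD | Tywin's War Strategy/solution.py | minSoldiers
-- ===== SOURCE A (Python) =====
-- import math
--
-- def minSoldiers(arr, k):
--     n = len(arr)
--     # Step 1: count already lucky troops
--     lucky_count = sum(1 for x in arr if x % k == 0)
--
--     required = math.ceil(n / 2) - lucky_count
--     if required <= 0:
--         return 0
--
--     # Step 2: find costs to make unlucky troops lucky
--     costs = []
--     for x in arr:
--         if x % k != 0:
--             costs.append(k - (x % k))
--
--     # Step 3: sort and sum smallest costs
--     costs.sort()
--     return sum(costs[:required])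
-- ===== SOURCE B (Python) =====
-- def _sum_smallest(xs, r):
--     # sum of the r smallest elements of xs, by quickselect-style partitioning
--     if r <= 0:
--         return 0
--     if r >= len(xs):
--         return sum(xs)
--     p = xs[len(xs) // 2]
--     lo = [x for x in xs if x < p]
--     eq_count = sum(1 for x in xs if x == p)
--     hi = [x for x in xs if x > p]
--     if r <= len(lo):
--         return _sum_smallest(lo, r)
--     if r <= len(lo) + eq_count:
--         return sum(lo) + p * (r - len(lo))
--     return sum(lo) + p * eq_count + _sum_smallest(hi, r - len(lo) - eq_count)
--
-- def minSoldiers(arr, k):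
--     required = (len(arr) + 1) // 2 - sum(1 for x in arr if x % k == 0)
--     if required <= 0:
--         return 0
--     costs = [k - x % k for x in arr if x % k != 0]
--     return _sum_smallest(costs, required)
-- ===== Notes on version B (the rewrite author's own statement) =====
-- stated objective: alternative
-- what changed: B replaces A's full sort of the cost list followed by summing the prefix with a quickselect-style recursive three-way partition that sums the `required` smallest costs directly, without ever sorting.
import Mathlib
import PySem

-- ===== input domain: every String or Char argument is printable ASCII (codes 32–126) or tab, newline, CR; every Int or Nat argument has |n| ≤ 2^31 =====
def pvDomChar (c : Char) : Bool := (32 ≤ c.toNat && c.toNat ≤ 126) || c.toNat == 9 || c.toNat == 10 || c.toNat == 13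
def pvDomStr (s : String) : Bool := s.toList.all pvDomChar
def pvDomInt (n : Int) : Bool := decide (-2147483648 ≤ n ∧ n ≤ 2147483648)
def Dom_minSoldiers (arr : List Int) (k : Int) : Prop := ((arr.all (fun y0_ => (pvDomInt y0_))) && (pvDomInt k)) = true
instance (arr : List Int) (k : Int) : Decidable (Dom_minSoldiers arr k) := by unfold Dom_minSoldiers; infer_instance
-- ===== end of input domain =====

-- B replaces A's sort-and-take-prefix by a quickselect-style recursive three-way
-- partition that sums the `required` smallest costs directly (alternative algorithm).

-- ===== PORT A =====
-- literal port of Source A: count lucky, required = ceil(n/2) - lucky, collect costs in a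
-- loop (foldl with append), sort, sum the prefix costs[:required].
def minSoldiers (arr : List Int) (k : Int) : Int :=
  let n : Int := arr.length
  let luckyCount := arr.foldl (fun acc x => if PySem.Int.mod x k == 0 then acc + 1 else acc) 0
  -- math.ceil(n / 2), for n = len(arr) ≥ 0, is exactly -((-n) // 2) (the float division is exact here)
  let required := -(PySem.Int.floordiv (-n) 2) - luckyCount
  if required ≤ 0 then 0
  else
    let costs := arr.foldl (fun acc x => if PySem.Int.mod x k != 0 then acc ++ [k - PySem.Int.mod x k] else acc) ([] : List Int)
    let sortedCosts := PySem.List.sorted costs (fun x => x) false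
    (PySem.List.slice sortedCosts none (some required)).sum

-- ===== PORT B =====
-- sum of the r smallest elements of xs, quickselect-style (port of _sum_smallest in Source B)
def sumSmallest (xs : List Int) (r : Int) : Int :=
  if r ≤ 0 then 0
  else if (xs.length : Int) ≤ r then xs.sum
  else
    -- p = xs[len(xs)//2]: the index is in range here (0 < r < len xs), so getD is exact
    let p := xs.getD (xs.length / 2) 0
    let lo := xs.filter (fun x => x < p)
    let eqc : Int := (xs.filter (fun x => x = p)).length
    let hi := xs.filter (fun x => p < x)
    if r ≤ (lo.length : Int) then sumSmallest lo r
    else if r ≤ (lo.length : Int) + eqc then lo.sum + p * (r - lo.length)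
    else lo.sum + p * eqc + sumSmallest hi (r - lo.length - eqc)
termination_by xs.length
decreasing_by
  all_goals
    (simp only [List.length_unattach]
     have hp : xs.getD (xs.length / 2) 0 ∈ xs := by
       rw [List.getD_eq_getElem xs 0 (by omega)]; exact xs.getElem_mem _
     exact (List.length_filter_lt_length_iff_exists.mpr
       ⟨⟨_, hp⟩, List.mem_attach _ _, by simp⟩).trans_le (List.length_attach).le)

def minSoldiers_alt (arr : List Int) (k : Int) : Int :=
  let required := PySem.Int.floordiv ((arr.length : Int) + 1) 2
                    - ((arr.filter (fun x => PySem.Int.mod x k == 0)).length : Int)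
  if required ≤ 0 then 0
  else sumSmallest ((arr.filter (fun x => PySem.Int.mod x k != 0)).map (fun x => k - PySem.Int.mod x k)) required

-- ===== PRECONDITION & SPEC =====
-- Pre_ excludes exactly the inputs where both Pythons raise ZeroDivisionError: k = 0 with
-- nonempty arr (with arr = [] both return 0 before evaluating any '%').
def Pre_minSoldiers (arr : List Int) (k : Int) : Prop := arr = [] ∨ k ≠ 0
instance (arr : List Int) (k : Int) : Decidable (Pre_minSoldiers arr k) := by unfold Pre_minSoldiers; infer_instance
def pvWitness_minSoldiers : List Int × Int := ([3, 5, 6, 7], 3)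

def Spec_minSoldiers (arr : List Int) (k : Int) (out : Int) : Prop := out = minSoldiers_alt arr k
instance (arr : List Int) (k : Int) (out : Int) : Decidable (Spec_minSoldiers arr k out) := by unfold Spec_minSoldiers; infer_instance

-- ===== CLAIM (what is proved, stated in full; the proofs are below) =====
def Claim_equal_minSoldiers : Prop := ∀ (arr : List Int) (k : Int), Dom_minSoldiers arr k → Pre_minSoldiers arr k → Spec_minSoldiers arr k (minSoldiers arr k)

-- ===== LEMMAS AND PROOFS =====

-- the three-way partition at p is a permutation of the list
lemma perm_three_filter (xs : List Int) (p : Int) :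
    (xs.filter (fun x => x < p) ++ (xs.filter (fun x => x = p) ++ xs.filter (fun x => p < x))).Perm xs := by
  induction xs with
  | nil => simp
  | cons a t ih =>
    rcases lt_trichotomy a p with h | h | h
    · simpa [List.filter_cons, h, ne_of_lt h, not_lt.mpr h.le] using ih.cons a
    · subst h
      simpa [List.filter_cons] using (List.perm_middle.trans (ih.cons a))
    · have hmid : (t.filter (fun x => x < p) ++ (t.filter (fun x => x = p) ++ a :: t.filter (fun x => p < x))).Perm
          (a :: (t.filter (fun x => x < p) ++ (t.filter (fun x => x = p) ++ t.filter (fun x => p < x)))) := by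
        simpa [List.append_assoc] using
          (List.perm_middle (a := a)
            (l₁ := t.filter (fun x => x < p) ++ t.filter (fun x => x = p))
            (l₂ := t.filter (fun x => p < x)))
      simpa [List.filter_cons, h, ne_of_gt h, not_lt.mpr h.le] using hmid.trans (ih.cons a)

-- sorted xs is the concatenation: sorted lo, the equal block, sorted hi
lemma sorted_partition (xs : List Int) (p : Int) :
    PySem.List.sorted xs (fun x => x) false =
      PySem.List.sorted (xs.filter (fun x => x < p)) (fun x => x) false
        ++ (xs.filter (fun x => x = p)
        ++ PySem.List.sorted (xs.filter (fun x => p < x)) (fun x => x) false) := by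
  have hloMem : ∀ x ∈ PySem.List.sorted (xs.filter (fun x => x < p)) (fun x => x) false, x < p := by
    intro x hx
    have := (PySem.List.mem_sorted _ _ _ x).mp hx
    simpa using (List.mem_filter.mp this).2
  have heqMem : ∀ x ∈ xs.filter (fun x => x = p), x = p := by
    intro x hx; simpa using (List.mem_filter.mp hx).2
  have hhiMem : ∀ x ∈ PySem.List.sorted (xs.filter (fun x => p < x)) (fun x => x) false, p < x := by
    intro x hx
    have := (PySem.List.mem_sorted _ _ _ x).mp hx
    simpa using (List.mem_filter.mp this).2
  apply PySem.List.sorted_id_eq_of_perm_of_pairwise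
  · exact ((PySem.List.sorted_perm _ _ _).append
      ((List.Perm.refl _).append (PySem.List.sorted_perm _ _ _))).trans (perm_three_filter xs p)
  · rw [List.pairwise_append, List.pairwise_append]
    refine ⟨PySem.List.sorted_pairwise _ _, ⟨?_, PySem.List.sorted_pairwise _ _, ?_⟩, ?_⟩
    · exact List.pairwise_of_forall_mem_list (fun a ha b hb => by rw [heqMem a ha, heqMem b hb])
    · exact fun a ha b hb => (heqMem a ha).le.trans (hhiMem b hb).le
    · intro a ha b hb
      rcases List.mem_append.mp hb with hb | hb
      · exact (hloMem a ha).le.trans (heqMem b hb).symm.le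
      · exact ((hloMem a ha).trans (hhiMem b hb)).le

-- main invariant: sumSmallest computes the sum of the first r elements of the sorted list
lemma sumSmallest_eq_aux (n : Nat) : ∀ (xs : List Int), xs.length ≤ n → ∀ (r : Int),
    sumSmallest xs r = ((PySem.List.sorted xs (fun x => x) false).take r.toNat).sum := by
  induction n with
  | zero =>
    intro xs hxs r
    have : xs = [] := List.length_eq_zero_iff.mp (Nat.le_zero.mp hxs)
    subst this
    have h0 : PySem.List.sorted ([] : List Int) (fun x => x) false = [] := rfl
    rw [sumSmallest]
    split_ifs with h1 h2
    · simp [h0]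
    · simp [h0]
    · exact absurd (by omega : (([] : List Int).length : Int) ≤ r) h2
  | succ n ih =>
    intro xs hxs r
    rw [sumSmallest]
    dsimp only
    split_ifs with h1 h2 h3 h4
    · simp [Int.toNat_of_nonpos (by omega : r ≤ 0)]
    · -- r ≥ len: the whole list
      rw [List.take_of_length_le (by rw [PySem.List.length_sorted]; omega)]
      exact ((PySem.List.sorted_perm _ _ _).sum_eq).symm
    all_goals
      (set p := xs.getD (xs.length / 2) 0 with hp
       have hpmem : p ∈ xs := by
         rw [hp, List.getD_eq_getElem xs 0 (by omega)]; exact xs.getElem_mem _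
       set lo := xs.filter (fun x => x < p) with hlo
       set E := xs.filter (fun x => x = p) with hE
       set hi := xs.filter (fun x => p < x) with hhi
       have hloLen : lo.length < xs.length :=
         List.length_filter_lt_length_iff_exists.mpr ⟨p, hpmem, by simp⟩
       have hhiLen : hi.length < xs.length :=
         List.length_filter_lt_length_iff_exists.mpr ⟨p, hpmem, by simp⟩
       have hErep : E = List.replicate E.length p :=
         List.eq_replicate_length.mpr (fun b hb => by simpa using (List.mem_filter.mp hb).2)
       have hsplit := sorted_partition xs p
       rw [← hlo, ← hE, ← hhi] at hsplit
       rw [hsplit, List.take_append, List.take_append, List.sum_append, List.sum_append,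
         PySem.List.length_sorted])
    · -- r ≤ lo.length
      rw [ih lo (by omega) r]
      have h0 : r.toNat - lo.length = 0 := by omega
      simp [h0]
    · -- lo.length < r ≤ lo.length + E.length
      rw [List.take_of_length_le (by rw [PySem.List.length_sorted]; omega : (PySem.List.sorted lo (fun x => x) false).length ≤ r.toNat)]
      have h0 : r.toNat - lo.length - E.length = 0 := by omega
      rw [h0, List.take_zero]
      conv_rhs => rw [hErep]
      rw [List.take_replicate]
      have hmin : min (r.toNat - lo.length) E.length = r.toNat - lo.length := by omega
      rw [hmin, List.sum_replicate, nsmul_eq_mul,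
        (PySem.List.sorted_perm lo (fun x => x) false).sum_eq]
      have hc : ((r.toNat - lo.length : Nat) : Int) = r - lo.length := by omega
      rw [hc]
      ring_nf
      simp
    · -- r > lo.length + E.length
      rw [List.take_of_length_le (by rw [PySem.List.length_sorted]; omega : (PySem.List.sorted lo (fun x => x) false).length ≤ r.toNat),
        List.take_of_length_le (by omega : E.length ≤ r.toNat - lo.length),
        ih hi (by omega) (r - lo.length - E.length)]
      have harg : (r - (lo.length : Int) - (E.length : Int)).toNat
          = r.toNat - lo.length - E.length := by omega
      rw [harg]
      have hEsum : E.sum = (E.length : Int) * p := by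
        conv_lhs => rw [hErep]
        simp [List.sum_replicate]
      rw [(PySem.List.sorted_perm lo (fun x => x) false).sum_eq, hEsum]
      ring

lemma sumSmallest_eq (xs : List Int) (r : Int) :
    sumSmallest xs r = ((PySem.List.sorted xs (fun x => x) false).take r.toNat).sum :=
  sumSmallest_eq_aux xs.length xs le_rfl r

-- ===== VERDICT (by name: the statement is the Claim_ definition above) =====
theorem minSoldiers_spec : Claim_equal_minSoldiers := by
  intro arr k _hdom _hpre
  unfold Spec_minSoldiers minSoldiers minSoldiers_alt
  simp only [PySem.List.foldl_count_if, PySem.List.foldl_append_if, List.nil_append,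
    List.countP_eq_length_filter, zero_add]
  have hceil : -(PySem.Int.floordiv (-(arr.length : Int)) 2)
      = PySem.Int.floordiv ((arr.length : Int) + 1) 2 := by
    rw [PySem.Int.floordiv_eq_ediv_of_pos (by omega), PySem.Int.floordiv_eq_ediv_of_pos (by omega)]
    omega
  rw [hceil]
  split_ifs with h
  · rfl
  · have hb : (0 : Int) ≤ PySem.Int.floordiv ((arr.length : Int) + 1) 2
        - ((arr.filter (fun x => PySem.Int.mod x k == 0)).length : Int) := by omega
    rw [PySem.List.slice_to _ hb, sumSmallest_eq]
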